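-- pv_equiv track=rewrite | github.com/Gisson/FP1516_1 | main.py | gera_chave1
-- ===== SOURCE A (Python) =====
-- def gera_chave1(letras):
--     result=();
--     aux=();
--     count=0;
--     for character in letras:
--         count+=1;
--         aux+=(character,);
--         if(count>=5):
--             count=0;
--             result+=(aux,);
--             aux=();
--     return result;
-- ===== SOURCE B (Python) =====
-- def gera_chave1(letras):
--     return tuple(zip(*[iter(letras)] * 5))
-- ===== Notes on version B (the rewrite author's own statement) =====
-- stated objective: faster
-- what changed: Replaced the explicit counter/accumulator loop built on repeated tuple += concatenation with the shared-iterator zip grouping idiom tuple(zip(*[iter(letras)]*5)), whose natural truncation drops the trailing short group.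
import Mathlib
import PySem

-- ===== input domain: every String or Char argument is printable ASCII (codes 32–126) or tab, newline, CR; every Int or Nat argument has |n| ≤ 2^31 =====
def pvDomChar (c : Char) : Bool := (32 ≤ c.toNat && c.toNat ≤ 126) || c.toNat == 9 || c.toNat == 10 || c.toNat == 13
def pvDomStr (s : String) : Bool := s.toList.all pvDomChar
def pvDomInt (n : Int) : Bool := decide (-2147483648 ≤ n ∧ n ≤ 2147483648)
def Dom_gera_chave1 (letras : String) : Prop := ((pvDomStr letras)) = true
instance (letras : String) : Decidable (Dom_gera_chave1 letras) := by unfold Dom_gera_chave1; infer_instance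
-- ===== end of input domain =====

-- B groups characters with the shared-iterator zip idiom instead of A's counter/accumulator loop; objective: idiomatic.

-- ===== PORT A =====
-- loop body of A: count += 1; aux += (character,); if count >= 5: flush aux into result
def gc1Step (s : List (List String) × List String × Int) (c : Char) :
    List (List String) × List String × Int :=
  let count := s.2.2 + 1
  let aux := s.2.1 ++ [String.ofList [c]]
  if count ≥ 5 then (s.1 ++ [aux], [], 0) else (s.1, aux, count)

def gera_chave1 (letras : String) : List (List String) :=
  (letras.toList.foldl gc1Step ([], [], 0)).1

-- ===== PORT B =====
-- transliteration of zip(*[iter(letras)]*5): pull five consecutive items per step, stop when fewer remain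
def gc1Chunk : List Char → List (List String)
  | a :: b :: c :: d :: e :: rest =>
      [String.ofList [a], String.ofList [b], String.ofList [c], String.ofList [d], String.ofList [e]] :: gc1Chunk rest
  | _ => []

def gera_chave1_alt (letras : String) : List (List String) :=
  gc1Chunk letras.toList

-- ===== PRECONDITION & SPEC =====
def Spec_gera_chave1 (letras : String) (out : List (List String)) : Prop := out = gera_chave1_alt letras
instance (letras : String) (out : List (List String)) : Decidable (Spec_gera_chave1 letras out) := by unfold Spec_gera_chave1; infer_instance

-- ===== CLAIM (what is proved, stated in full; the proofs are below) =====
def Claim_equal_gera_chave1 : Prop := ∀ (letras : String), Dom_gera_chave1 letras → Spec_gera_chave1 letras (gera_chave1 letras)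

-- ===== LEMMAS AND PROOFS =====

-- invariant: from a flushed state (res, [], 0) the fold appends exactly the 5-chunks of l
theorem gc1_fold_key (l : List Char) (res : List (List String)) :
    (l.foldl gc1Step (res, [], 0)).1 = res ++ gc1Chunk l := by
  match l with
  | [] => simp [gc1Chunk]
  | [a] => norm_num [gc1Chunk, gc1Step, List.foldl]
  | [a, b] => norm_num [gc1Chunk, gc1Step, List.foldl]
  | [a, b, c] => norm_num [gc1Chunk, gc1Step, List.foldl]
  | [a, b, c, d] => norm_num [gc1Chunk, gc1Step, List.foldl]
  | a :: b :: c :: d :: e :: rest =>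
      have h5 : ((((0 : Int) + 1 + 1 + 1 + 1) + 1) ≥ 5) := by norm_num
      simp only [List.foldl]
      norm_num [gc1Step]
      rw [gc1_fold_key rest (res ++ [[String.ofList [a], String.ofList [b], String.ofList [c], String.ofList [d], String.ofList [e]]])]
      simp [gc1Chunk]
termination_by l.length

-- ===== VERDICT (by name: the statement is the Claim_ definition above) =====
theorem gera_chave1_spec : Claim_equal_gera_chave1 := by
  intro letras _
  unfold Spec_gera_chave1 gera_chave1 gera_chave1_alt
  simpa using gc1_fold_key letras.toList []
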